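-- pv_equiv track=rewrite | github.com/Ernyoke/codeforces-py | elementary_particles.py | solve
-- ===== SOURCE A (Python) =====
-- def solve(a):
--     d = dict()
--     for i, value in enumerate(a):
--         d.setdefault(value, []).append(i + 1)
--
--     ans = -1
--     for positions in d.values():
--         if len(positions) >= 2:
--             for i in range(0, len(positions) - 1):
--                 ans = max(ans, len(a) - (positions[i + 1] - positions[i]))
--
--     return ans
-- ===== SOURCE B (Python) =====
-- def solve(a):
--     last = {}
--     ans = -1
--     for i, value in enumerate(a):
--         if value in last:
--             ans = max(ans, len(a) - (i - last[value]))
--         last[value] = i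
--     return ans
-- ===== Notes on version B (the rewrite author's own statement) =====
-- stated objective: simpler
-- what changed: Instead of building a dict of full position lists and then running a nested second pass over every list, B does one pass over enumerate(a), keeping only the last index seen per value and folding the max on the fly.
import Mathlib
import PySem

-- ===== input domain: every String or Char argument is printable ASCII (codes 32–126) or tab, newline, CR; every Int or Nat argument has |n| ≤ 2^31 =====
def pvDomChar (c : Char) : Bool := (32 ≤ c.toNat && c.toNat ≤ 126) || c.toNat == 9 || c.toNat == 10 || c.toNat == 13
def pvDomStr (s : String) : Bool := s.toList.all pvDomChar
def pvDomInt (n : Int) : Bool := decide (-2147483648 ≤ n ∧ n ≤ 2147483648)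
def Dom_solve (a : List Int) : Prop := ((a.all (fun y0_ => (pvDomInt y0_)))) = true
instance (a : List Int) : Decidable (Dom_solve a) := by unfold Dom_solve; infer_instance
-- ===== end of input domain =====

-- B replaces A's dict-of-position-lists plus nested second pass by a single pass keeping only
-- the last index of each value (objective: simpler; return value only — neither mutates its input).

-- ===== PORT A =====
def solve (a : List Int) : Int :=
  let d : PySem.Dict Int (List Int) :=
    (PySem.List.enumerate a).foldl
      (fun d p => d.modify p.2 [] (fun ps => ps ++ [p.1 + 1])) PySem.Dict.empty
  d.values.foldl
    (fun ans ps =>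
      if 2 ≤ ps.length then
        (PySem.List.pyRange 0 ((ps.length : Int) - 1)).foldl
          (fun ans i =>
            max ans ((a.length : Int) -
              (PySem.List.pyGetD ps (i + 1) 0 - PySem.List.pyGetD ps i 0))) ans
      else ans)
    (-1)

-- ===== PORT B =====
def solve_alt (a : List Int) : Int :=
  ((PySem.List.enumerate a).foldl
    (fun s p =>
      (s.1.insert p.2 p.1,
       if s.1.contains p.2 then max s.2 ((a.length : Int) - (p.1 - s.1.getD p.2 0)) else s.2))
    ((PySem.Dict.empty : PySem.Dict Int Int), (-1 : Int))).2

-- ===== PRECONDITION & SPEC =====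
def Spec_solve (a : List Int) (out : Int) : Prop := out = solve_alt a
instance (a : List Int) (out : Int) : Decidable (Spec_solve a out) := by unfold Spec_solve; infer_instance

-- ===== CLAIM (what is proved, stated in full; the proofs are below) =====
def Claim_equal_solve : Prop := ∀ (a : List Int), Dom_solve a → Spec_solve a (solve a)

-- ===== LEMMAS AND PROOFS =====

-- adjacent-gap contributions of a list of 1-based positions
def gaps (n : Int) : List Int → List Int
  | x :: y :: t => (n - (y - x)) :: gaps n (y :: t)
  | _ => []

-- the same over (index, value) pairs, using the 0-based indices
def gapsP (n : Int) : List (Int × Int) → List Int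
  | p :: q :: t => (n - (q.1 - p.1)) :: gapsP n (q :: t)
  | _ => []

-- B's stream of contributions, in input order
def bContribs (n : Int) (last : PySem.Dict Int Int) : List (Int × Int) → List Int
  | [] => []
  | p :: l =>
      (if last.contains p.2 then [n - (p.1 - last.getD p.2 0)] else []) ++
      bContribs n (last.insert p.2 p.1) l

-- occurrence positions (1-based) of value v in a, as A's dict stores them
def occA (a : List Int) (v : Int) : List Int :=
  ((PySem.List.enumerate a).filter (fun p => p.2 == v)).map (fun p => p.1 + 1)

-- B's last-index dict after a prefix
def lastD (last : PySem.Dict Int Int) (l : List (Int × Int)) : PySem.Dict Int Int :=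
  l.foldl (fun d p => d.insert p.2 p.1) last

theorem gaps_map_addone (n : Int) (l : List (Int × Int)) :
    gaps n (l.map (fun p => p.1 + 1)) = gapsP n l := by
  induction l with
  | nil => rfl
  | cons p t ih =>
    cases t with
    | nil => rfl
    | cons q u =>
      simp only [List.map_cons, gaps, gapsP, List.cons.injEq]
      exact ⟨by ring, by simpa using ih⟩

theorem gapsP_concat (n : Int) (l : List (Int × Int)) (p : Int × Int) :
    gapsP n (l ++ [p]) =
      gapsP n l ++ (match l.getLast? with
        | some q => [n - (p.1 - q.1)]
        | none => []) := by
  induction l with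
  | nil => rfl
  | cons q t ih =>
    cases t with
    | nil => rfl
    | cons r u =>
      simp only [List.cons_append, gapsP, List.getLast?_cons_cons] at *
      rw [ih]

theorem rangeFold (n : Int) (ps : List Int) : ∀ (ans : Int),
    (List.range (ps.length - 1)).foldl
      (fun ans k => max ans (n - (ps.getD (k+1) 0 - ps.getD k 0))) ans
    = (gaps n ps).foldl max ans := by
  induction ps with
  | nil => intro ans; rfl
  | cons x t ih =>
    intro ans
    cases t with
    | nil => rfl
    | cons y u =>
      have hlen : (x :: y :: u).length - 1 = (u.length + 1) := by simp
      rw [hlen, List.range_succ_eq_map, List.foldl_cons, List.foldl_map]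
      have h2 : ((y :: u).length - 1) = u.length := by simp
      have := ih (max ans (n - (y - x)))
      rw [h2] at this
      simp only [List.getD_cons_succ, List.getD_cons_zero] at *
      rw [show gaps n (x::y::u) = (n - (y - x)) :: gaps n (y::u) from rfl, List.foldl_cons]
      exact this

theorem innerA (n : Int) (ps : List Int) (ans : Int) :
    (PySem.List.pyRange 0 ((ps.length : Int) - 1)).foldl
      (fun ans i => max ans (n - (PySem.List.pyGetD ps (i + 1) 0 - PySem.List.pyGetD ps i 0))) ans
    = (gaps n ps).foldl max ans := by
  rw [PySem.List.pyRange_one, List.foldl_map]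
  have ht : ((ps.length : Int) - 1 - 0).toNat = ps.length - 1 := by omega
  rw [ht, ← rangeFold]
  congr 1
  funext ans k
  simp only [zero_add]
  rw [show ((k : Int) + 1) = (((k + 1 : Nat)) : Int) by push_cast; ring,
     PySem.List.pyGetD_natCast, PySem.List.pyGetD_natCast]

theorem solveA_eq (a : List Int) :
    solve a =
      (((PySem.Set.ofList a).map (fun v => gaps (a.length : Int) (occA a v))).flatten).foldl
        max (-1) := by
  unfold solve
  dsimp only
  set n : Int := (a.length : Int) with hn
  set d : PySem.Dict Int (List Int) :=
    (PySem.List.enumerate a).foldl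
      (fun d p => d.modify p.2 [] (fun ps => ps ++ [p.1 + 1])) PySem.Dict.empty with hd
  have hkeys : d.keys = PySem.Set.ofList a := by
    rw [hd, PySem.Dict.keys_foldl_modify_key (PySem.List.enumerate a) (fun p => p.2) []
      (fun _ p => fun ps => ps ++ [p.1 + 1]) PySem.Dict.empty]
    simp [PySem.Set.update_nil_left, PySem.List.map_snd_enumerate]
  have hnd : d.keys.Nodup := by
    rw [hd]
    exact PySem.Dict.nodup_keys_foldl_modify_key _ _ _ _ _ (by simp)
  have hget : ∀ v, d.getD v [] = occA a v := by
    intro v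
    have hmap : d = ((PySem.List.enumerate a).map (fun p => (p.2, p.1 + 1))).foldl
        (fun d q => d.modify q.1 [] (fun ps => ps ++ [q.2])) PySem.Dict.empty := by
      rw [hd, List.foldl_map]
    rw [hmap, PySem.Dict.getD_foldl_modify_append]
    simp [occA, List.filter_map, Function.comp_def]
  have hvals : d.values = (PySem.Set.ofList a).map (fun v => d.getD v []) := by
    rw [PySem.Dict.values_eq_map_keys d hnd [], hkeys]
  rw [hvals]
  have hstep : (fun (ans : Int) (ps : List Int) =>
      if 2 ≤ ps.length then
        (PySem.List.pyRange 0 ((ps.length : Int) - 1)).foldl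
          (fun ans i => max ans (n - (PySem.List.pyGetD ps (i + 1) 0 - PySem.List.pyGetD ps i 0))) ans
      else ans) = fun ans ps => (gaps n ps).foldl max ans := by
    funext ans ps
    split
    · exact innerA n ps ans
    · cases ps with
      | nil => rfl
      | cons x t => cases t with
        | nil => rfl
        | cons y u => simp at *
  rw [hstep, List.foldl_map, List.foldl_flatten, List.foldl_map]
  congr 1
  funext ans v
  rw [hget v]

theorem lastD_get? (l : List (Int × Int)) (last : PySem.Dict Int Int) (v : Int) :
    (lastD last l).get? v =
      (((l.filter (fun p => p.2 == v)).map (fun p => p.1)).getLast?).or (last.get? v) := by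
  induction l using List.reverseRecOn with
  | nil => simp [lastD]
  | append_singleton l p ih =>
    rw [lastD, List.foldl_append, List.foldl_cons, List.foldl_nil]
    rw [show (List.foldl (fun d p => d.insert p.2 p.1) last l) = lastD last l from rfl]
    rw [PySem.Dict.get?_insert, List.filter_append]
    by_cases h : p.2 = v
    · simp [h]
    · simp [h, ih]
      intro hc; exact absurd hc.symm h

theorem bContribs_concat (n : Int) (l : List (Int × Int)) (p : Int × Int) :
    ∀ last, bContribs n last (l ++ [p]) =
      bContribs n last l ++
      (if (lastD last l).contains p.2 then [n - (p.1 - (lastD last l).getD p.2 0)] else []) := by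
  induction l with
  | nil => intro last; simp [bContribs, lastD]
  | cons q t ih =>
    intro last
    simp only [List.cons_append, bContribs, List.append_assoc]
    rw [ih (last.insert q.2 q.1)]
    rfl

theorem solveB_eq (a : List Int) :
    solve_alt a = (bContribs (a.length : Int) PySem.Dict.empty (PySem.List.enumerate a)).foldl
      max (-1) := by
  unfold solve_alt
  set n : Int := (a.length : Int)
  suffices h : ∀ (l : List (Int × Int)) (last : PySem.Dict Int Int) (ans : Int),
      (l.foldl (fun s p =>
        (s.1.insert p.2 p.1,
         if s.1.contains p.2 then max s.2 (n - (p.1 - s.1.getD p.2 0)) else s.2)) (last, ans)).2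
      = (bContribs n last l).foldl max ans from h _ _ _
  intro l
  induction l with
  | nil => intro last ans; rfl
  | cons p t ih =>
    intro last ans
    rw [List.foldl_cons, bContribs]
    by_cases h : last.contains p.2
    · simp only [h, if_true, ih, List.singleton_append, List.foldl_cons]
    · simp only [h, ih]
      simp

theorem bContribs_perm (n : Int) (l : List (Int × Int)) :
    (bContribs n PySem.Dict.empty l).Perm
      (((PySem.Set.ofList (l.map (fun p => p.2))).map
        (fun v => gapsP n (l.filter (fun p => p.2 == v)))).flatten) := by
  induction l using List.reverseRecOn with
  | nil => simp [bContribs]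
  | append_singleton l p ih =>
    have hkeys : (lastD PySem.Dict.empty l).keys = PySem.Set.ofList (l.map (fun p => p.2)) := by
      rw [lastD, PySem.Dict.keys_foldl_insert_key l (fun p => p.2) (fun _ p => p.1) PySem.Dict.empty]
      simp [PySem.Set.update_nil_left]
    have hcont : (lastD PySem.Dict.empty l).contains p.2 = true ↔ p.2 ∈ l.map (fun p => p.2) := by
      rw [PySem.Dict.contains_iff_mem_keys, hkeys, PySem.Set.mem_ofList]
    rw [bContribs_concat, List.map_append]
    simp only [List.map_cons, List.map_nil]
    rw [PySem.Set.ofList_append_singleton]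
    by_cases h : p.2 ∈ l.map (fun p => p.2)
    · -- value seen before: one new contribution, appended inside its value's group
      have hc : (lastD PySem.Dict.empty l).contains p.2 = true := hcont.mpr h
      set fl := l.filter (fun q => q.2 == p.2) with hfl
      have hne : fl ≠ [] := by
        obtain ⟨q, hq, he⟩ := List.mem_map.mp h
        have : q ∈ fl := List.mem_filter.mpr ⟨hq, by simp [he]⟩
        exact List.ne_nil_of_mem this
      have hlast : fl.getLast? = some (fl.getLast hne) := List.getLast?_eq_some_getLast hne
      have hgetD : (lastD PySem.Dict.empty l).getD p.2 0 = (fl.getLast hne).1 := by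
        rw [PySem.Dict.getD_eq_get?_getD, lastD_get?, PySem.Dict.get?_empty]
        rw [List.getLast?_map, ← hfl, hlast]
        rfl
      rw [hc, if_pos rfl, hgetD]
      have hmem : p.2 ∈ PySem.Set.ofList (l.map (fun p => p.2)) :=
        (PySem.Set.mem_ofList _ _).mpr h
      rw [PySem.Set.add_of_mem hmem]
      obtain ⟨v1, v2, hsplit⟩ := List.append_of_mem hmem
      have hnd : (PySem.Set.ofList (l.map (fun p => p.2))).Nodup :=
        PySem.Set.nodup_ofList _
      rw [hsplit] at hnd
      have hp1 : p.2 ∉ v1 := by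
        intro hx; exact (List.disjoint_of_nodup_append hnd hx) (List.mem_cons_self ..)
      have hp2 : p.2 ∉ v2 := by
        have := (List.nodup_append.mp hnd).2.1
        exact (List.nodup_cons.mp this).1
      have hother : ∀ v, v ≠ p.2 →
          (l ++ [p]).filter (fun q => q.2 == v) = l.filter (fun q => q.2 == v) := by
        intro v hv
        rw [List.filter_append]
        simp [Ne.symm hv]
      have hpfil : (l ++ [p]).filter (fun q => q.2 == p.2) = fl ++ [p] := by
        rw [List.filter_append, ← hfl]
        simp
      have hgaps : gapsP n ((l ++ [p]).filter (fun q => q.2 == p.2)) =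
          gapsP n fl ++ [n - (p.1 - (fl.getLast hne).1)] := by
        rw [hpfil, gapsP_concat, hlast]
      rw [hsplit]
      refine ((ih.append_right _).trans ?_)
      rw [hsplit]
      have hm1 : ∀ vs : List Int, p.2 ∉ vs →
          vs.map (fun v => gapsP n ((l ++ [p]).filter (fun q => q.2 == v))) =
          vs.map (fun v => gapsP n (l.filter (fun q => q.2 == v))) := by
        intro vs hvs
        exact List.map_congr_left (fun v hv => by
          rw [hother v (fun e => hvs (e ▸ hv))])
      rw [List.map_append, List.map_append, List.map_cons, List.map_cons,
        List.flatten_append, List.flatten_append, List.flatten_cons, List.flatten_cons,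
        hm1 v1 hp1, hm1 v2 hp2, hgaps]
      simp only [List.append_assoc]
      refine List.Perm.append_left _ ?_
      refine List.Perm.append_left _ ?_
      exact List.perm_append_comm
    · -- a value not seen before contributes nothing: its group is a singleton, no gap
      have hc : (lastD PySem.Dict.empty l).contains p.2 = false := by
        rw [← Bool.not_eq_true]
        intro hb; exact h (hcont.mp hb)
      rw [hc]
      simp only [Bool.false_eq_true, if_false, List.append_nil]
      have hnm : p.2 ∉ PySem.Set.ofList (l.map (fun p => p.2)) := by
        rw [PySem.Set.mem_ofList]; exact h
      rw [PySem.Set.add_of_not_mem hnm]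
      have h0 : l.filter (fun q => q.2 == p.2) = [] :=
        List.filter_eq_nil_iff.mpr (fun q hq => by
          simp only [beq_iff_eq]
          intro e; exact h (e ▸ List.mem_map_of_mem hq))
      have hother : ∀ v ∈ PySem.Set.ofList (l.map (fun p => p.2)),
          (l ++ [p]).filter (fun q => q.2 == v) = l.filter (fun q => q.2 == v) := by
        intro v hv
        have hv' : v ≠ p.2 := fun e => h (e ▸ (PySem.Set.mem_ofList _ _).mp hv)
        rw [List.filter_append]
        simp [Ne.symm hv']
      rw [List.map_append, List.flatten_append, List.map_congr_left (fun v hv => by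
        rw [hother v hv])]
      simpa [h0, gapsP] using ih

-- ===== VERDICT (by name: the statement is the Claim_ definition above) =====
theorem solve_spec : Claim_equal_solve := by
  intro a _
  unfold Spec_solve
  rw [solveA_eq, solveB_eq]
  refine (List.Perm.foldl_eq (rcomm := ⟨fun b a₁ a₂ => by
    simp [max_comm, max_left_comm]⟩) ?_ (-1)).symm
  refine (bContribs_perm _ _).trans ?_
  rw [PySem.List.map_snd_enumerate]
  refine List.Perm.of_eq ?_
  congr 1
  refine List.map_congr_left ?_
  intro v _
  rw [← gaps_map_addone]
  rfl
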